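-- pv_equiv track=rewrite | github.com/TimEpsilon/BetterNIRSpecBackground | JWST/utils.py | getPolynomialOrder
-- ===== SOURCE A (Python) =====
-- def getPolynomialOrder(coeffCount):
-- 	"""
-- 	Returns the order of a polynomial based on the amount of coefficients
--
-- 	The amount of coefficients is given by n^2/2 + 3/2*n + 1, n the order
-- 	Parameters
--
-- 	The order is assumed to be somewhere between 0 and 6
-- 	----------
-- 	coeffCount : int
-- 		The amount of coefficients
--
-- 	Returns
-- 	-------
-- 	order : int
-- 		The order of the polynomial
-- 	"""
--
-- 	order = None
-- 	for n in range(7):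
-- 		amount = n**2 / 2 + 3/2 * n + 1
-- 		if amount == coeffCount:
-- 			order = n
-- 			return order
--
-- 	return order
-- ===== SOURCE B (Python) =====
-- _ORDER_BY_COUNT = {1: 0, 3: 1, 6: 2, 10: 3, 15: 4, 21: 5, 28: 6}
--
-- def getPolynomialOrder(coeffCount):
--     return _ORDER_BY_COUNT.get(coeffCount)
-- ===== Notes on version B (the rewrite author's own statement) =====
-- stated objective: simpler
-- what changed: Replaces the loop that recomputes n^2/2+3/2*n+1 for each n in range(7) with a single lookup in a precomputed coefficient-count-to-order table.
import Mathlib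
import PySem

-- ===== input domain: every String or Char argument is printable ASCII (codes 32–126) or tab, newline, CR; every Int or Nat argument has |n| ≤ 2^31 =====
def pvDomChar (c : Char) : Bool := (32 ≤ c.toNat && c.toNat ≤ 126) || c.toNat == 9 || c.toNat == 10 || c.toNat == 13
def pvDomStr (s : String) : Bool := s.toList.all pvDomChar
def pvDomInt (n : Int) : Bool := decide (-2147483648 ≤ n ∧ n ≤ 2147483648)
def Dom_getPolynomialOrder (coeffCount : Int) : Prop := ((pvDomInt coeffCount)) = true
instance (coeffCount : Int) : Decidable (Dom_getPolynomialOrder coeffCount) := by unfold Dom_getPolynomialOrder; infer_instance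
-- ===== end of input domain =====

-- B replaces A's scan over n=0..6 (recomputing n^2/2+3/2*n+1 each step) by one lookup
-- in a precomputed count→order table; objective: simpler (return value only).

-- ===== PORT A =====
-- A's loop body compares the float n**2/2 + 3/2*n + 1 with the int coeffCount; for
-- n in 0..6 that float is exactly the integer (n^2+3n+2)/2, so the comparison is
-- exact and ported as the integer equation n^2+3n+2 == 2*coeffCount.
def pvALoop (coeffCount : Int) : List Int → Option Int
  | [] => none
  | n :: rest =>
      if n * n + 3 * n + 2 == 2 * coeffCount then some n else pvALoop coeffCount rest

def getPolynomialOrder (coeffCount : Int) : Option Int :=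
  pvALoop coeffCount (PySem.List.pyRange 0 7 1)

-- ===== PORT B =====
def pvOrderByCount : PySem.Dict Int Int :=
  PySem.Dict.ofList [(1, 0), (3, 1), (6, 2), (10, 3), (15, 4), (21, 5), (28, 6)]

def getPolynomialOrder_alt (coeffCount : Int) : Option Int :=
  PySem.Dict.get? pvOrderByCount coeffCount

-- ===== PRECONDITION & SPEC =====
def Spec_getPolynomialOrder (coeffCount : Int) (out : Option Int) : Prop := out = getPolynomialOrder_alt coeffCount
instance (coeffCount : Int) (out : Option Int) : Decidable (Spec_getPolynomialOrder coeffCount out) := by unfold Spec_getPolynomialOrder; infer_instance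

-- ===== CLAIM (what is proved, stated in full; the proofs are below) =====
def Claim_equal_getPolynomialOrder : Prop := ∀ (coeffCount : Int), Dom_getPolynomialOrder coeffCount → Spec_getPolynomialOrder coeffCount (getPolynomialOrder coeffCount)

-- ===== LEMMAS AND PROOFS =====

-- ===== VERDICT (by name: the statement is the Claim_ definition above) =====
set_option maxHeartbeats 1000000 in
theorem getPolynomialOrder_spec : Claim_equal_getPolynomialOrder := by
  intro c _
  by_cases h1 : c = 1
  · subst h1; decide
  by_cases h3 : c = 3
  · subst h3; decide
  by_cases h6 : c = 6
  · subst h6; decide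
  by_cases h10 : c = 10
  · subst h10; decide
  by_cases h15 : c = 15
  · subst h15; decide
  by_cases h21 : c = 21
  · subst h21; decide
  by_cases h28 : c = 28
  · subst h28; decide
  -- c matches no table entry: both sides return none
  unfold Spec_getPolynomialOrder getPolynomialOrder getPolynomialOrder_alt
  have hr : PySem.List.pyRange 0 7 1 = [0, 1, 2, 3, 4, 5, 6] := by decide
  have hD : pvOrderByCount =
      PySem.Dict.mk [(1, 0), (3, 1), (6, 2), (10, 3), (15, 4), (21, 5), (28, 6)] := by decide
  rw [hr, hD]
  simp only [pvALoop, PySem.Dict.get?_mk_cons, beq_iff_eq]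
  split_ifs <;> first | rfl | omega
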